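-- pv_equiv track=rewrite | github.com/tomisilander/bn | src/util/fishim.py | gen_versions
-- ===== SOURCE A (Python) =====
-- from itertools import product, combinations_with_replacement
--
-- def gen_versions(x,vcs):
--     misixs = [i for (i,v) in enumerate(x) if v == -1]
--     if len(misixs)==0:
--         yield x
--     else:
--         for mcfg in product(*(range(vcs[i]) for i in misixs)):
--             nx = list(x)
--             for (i,v) in zip(misixs,mcfg):
--                 nx[i]=v
--             yield nx
-- ===== SOURCE B (Python) =====
-- def gen_versions(x, vcs):
--     misixs = [i for (i, v) in enumerate(x) if v == -1]
--     if not misixs: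
--         yield x
--         return
--     nx = list(x)
--
--     def rec(k):
--         if k == len(misixs):
--             yield list(nx)
--         else:
--             i = misixs[k]
--             for v in range(vcs[i]):
--                 nx[i] = v
--                 yield from rec(k + 1)
--
--     yield from rec(0)
-- ===== Notes on version B (the rewrite author's own statement) =====
-- stated objective: alternative
-- what changed: Replaces the itertools.product tuple enumeration plus a per-tuple rebuild-and-assign loop by a recursive backtracking generator that fills one missing position at a time in a single mutable buffer, copying the buffer only at each leaf.
import Mathlib
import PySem

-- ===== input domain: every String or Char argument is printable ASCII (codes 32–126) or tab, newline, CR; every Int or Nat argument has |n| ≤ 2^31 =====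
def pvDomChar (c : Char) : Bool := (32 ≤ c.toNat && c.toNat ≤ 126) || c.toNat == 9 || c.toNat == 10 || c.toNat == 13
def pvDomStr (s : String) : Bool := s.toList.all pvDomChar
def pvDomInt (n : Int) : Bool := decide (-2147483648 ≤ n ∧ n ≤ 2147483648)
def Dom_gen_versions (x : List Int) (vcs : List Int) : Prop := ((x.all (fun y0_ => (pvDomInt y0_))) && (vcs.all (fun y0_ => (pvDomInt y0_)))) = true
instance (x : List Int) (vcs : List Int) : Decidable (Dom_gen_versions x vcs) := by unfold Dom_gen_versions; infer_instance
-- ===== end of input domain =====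

-- B replaces the itertools.product enumeration (build each tuple, then rebuild-and-assign a copy of x)
-- by a recursive backtracker that fills one missing index at a time (objective: alternative).


-- ===== PORT A =====
-- product(*lists): Python's lexicographic Cartesian product (hand-ported; exact)
def cartProd : List (List Int) → List (List Int)
  | [] => [[]]
  | l :: ls => l.flatMap (fun a => (cartProd ls).map (a :: ·))

def gen_versions (x : List Int) (vcs : List Int) : List (List Int) :=
  let misixs : List Nat := (List.range x.length).filter (fun i => x.getD i 0 = -1)
  if misixs.length = 0 then [x]
  else
    (cartProd (misixs.map (fun i => PySem.List.pyRange 0 (vcs.getD i 0) 1))).map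
      (fun mcfg => ((misixs.zip mcfg).foldl (fun nx iv => nx.set iv.1 iv.2) x))

-- ===== PORT B =====
-- rec(k): fill misixs[k] with each value, recurse; leaf = snapshot of the buffer
def fillRec (vcs : List Int) (nx : List Int) : List Nat → List (List Int)
  | [] => [nx]
  | i :: rest => (PySem.List.pyRange 0 (vcs.getD i 0) 1).flatMap
      (fun v => fillRec vcs (nx.set i v) rest)

def gen_versions_alt (x : List Int) (vcs : List Int) : List (List Int) :=
  let misixs : List Nat := (List.range x.length).filter (fun i => x.getD i 0 = -1)
  if misixs = [] then [x] else fillRec vcs x misixs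

-- ===== PRECONDITION & SPEC =====
-- Pre_ excludes exactly the inputs where Python A raises IndexError: a missing (-1) position of x
-- with no corresponding entry in vcs.
def Pre_gen_versions (x : List Int) (vcs : List Int) : Prop :=
  ∀ i ∈ List.range x.length, x.getD i 0 = -1 → i < vcs.length
instance (x : List Int) (vcs : List Int) : Decidable (Pre_gen_versions x vcs) := by
  unfold Pre_gen_versions; infer_instance
def pvWitness_gen_versions : List Int × List Int := ([-1, 2, -1], [2, 3, 2])

def Spec_gen_versions (x : List Int) (vcs : List Int) (out : List (List Int)) : Prop := out = gen_versions_alt x vcs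
instance (x : List Int) (vcs : List Int) (out : List (List Int)) : Decidable (Spec_gen_versions x vcs out) := by unfold Spec_gen_versions; infer_instance

-- ===== CLAIM (what is proved, stated in full; the proofs are below) =====
def Claim_equal_gen_versions : Prop := ∀ (x : List Int) (vcs : List Int), Dom_gen_versions x vcs → Pre_gen_versions x vcs → Spec_gen_versions x vcs (gen_versions x vcs)

-- ===== LEMMAS AND PROOFS =====
-- B's recursion equals "map the assignment fold over the Cartesian product", for any buffer.
theorem fillRec_eq_map_cartProd (vcs : List Int) (mis : List Nat) :
    ∀ nx : List Int,
      fillRec vcs nx mis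
        = (cartProd (mis.map (fun i => PySem.List.pyRange 0 (vcs.getD i 0) 1))).map
            (fun mcfg => (mis.zip mcfg).foldl (fun nx iv => nx.set iv.1 iv.2) nx) := by
  induction mis with
  | nil => intro nx; simp [fillRec, cartProd]
  | cons i rest ih =>
      intro nx
      simp only [fillRec, cartProd, List.map_cons, List.map_flatMap, List.map_map]
      refine List.flatMap_congr ?_
      intro v _
      rw [ih (nx.set i v)]
      refine List.map_congr_left ?_
      intro cfg _
      simp [List.zip_cons_cons, List.foldl_cons]

-- ===== VERDICT (by name: the statement is the Claim_ definition above) =====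
theorem gen_versions_spec : Claim_equal_gen_versions := by
  intro x vcs _ _
  unfold Spec_gen_versions gen_versions gen_versions_alt
  simp only []
  by_cases h : (List.range x.length).filter (fun i => x.getD i 0 = -1) = []
  · rw [if_pos (by rw [h]; rfl), if_pos h]
  · rw [if_neg (by simpa [List.length_eq_zero_iff] using h), if_neg h,
      fillRec_eq_map_cartProd]
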